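-- pv_equiv track=rewrite | github.com/Tyduss/One-Eval | one_eval/agents/bench_config_recommend_agent.py | _pick_best_split
-- ===== SOURCE A (Python) =====
-- from typing import Dict, Any, List, Optional
--
-- def _pick_best_split(splits: List[str], preferred: str) -> str:
--     if not splits:
--         return preferred
--     if preferred in splits:
--         return preferred
--     for cand in ("test", "validation", "dev", "val", "train"):
--         if cand in splits:
--             return cand
--     fuzzy_test = [s for s in splits if "test" in s.lower()]
--     if fuzzy_test:
--         return fuzzy_test[0]
--     fuzzy_val = [s for s in splits if "valid" in s.lower() or "dev" in s.lower()]
--     if fuzzy_val: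
--         return fuzzy_val[0]
--     return splits[0]
-- ===== SOURCE B (Python) =====
-- def _pick_best_split(splits, preferred):
--     if not splits:
--         return preferred
--     if preferred in splits:
--         return preferred
--     exact = ("test", "validation", "dev", "val", "train")
--
--     def rank(s):
--         if s in exact:
--             return exact.index(s)
--         low = s.lower()
--         if "test" in low:
--             return 10
--         if "valid" in low or "dev" in low:
--             return 11
--         return 100
--
--     return min(splits, key=rank)
-- ===== Notes on version B (the rewrite author's own statement) =====
-- stated objective: alternative
-- what changed: Replaces A's chain of sequential scans (preferred guard, five exact-candidate membership tests, fuzzy-test filter, fuzzy-val filter, positional fallback) by a single argmin pass over splits with a numeric priority key; min's keep-first-on-tie rule reproduces A's splits-order tie-break.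
import Mathlib
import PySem

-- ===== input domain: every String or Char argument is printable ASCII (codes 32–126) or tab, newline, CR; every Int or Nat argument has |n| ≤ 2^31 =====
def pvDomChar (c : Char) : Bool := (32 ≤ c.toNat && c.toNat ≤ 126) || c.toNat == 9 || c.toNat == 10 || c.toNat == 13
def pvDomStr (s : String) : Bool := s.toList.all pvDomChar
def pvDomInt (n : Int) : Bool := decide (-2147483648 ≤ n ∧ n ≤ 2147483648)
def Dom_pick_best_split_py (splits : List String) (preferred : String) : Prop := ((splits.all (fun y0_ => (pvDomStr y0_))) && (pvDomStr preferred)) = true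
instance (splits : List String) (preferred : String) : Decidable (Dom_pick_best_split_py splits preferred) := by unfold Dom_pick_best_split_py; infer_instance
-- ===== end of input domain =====

-- B replaces A's chain of early-return scans by one argmin pass with a numeric priority
-- key (objective: alternative decomposition, same asymptotic cost).

-- ===== PORT A =====
-- shared primitive predicates: '"test" in s.lower()' and '"valid" in s.lower() or "dev" in s.lower()'
def pvTest (s : String) : Bool := PySem.Str.isIn "test" (PySem.Str.lower s)
def pvVal (s : String) : Bool :=
  PySem.Str.isIn "valid" (PySem.Str.lower s) || PySem.Str.isIn "dev" (PySem.Str.lower s)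
-- the candidate tuple ("test", "validation", "dev", "val", "train")
def pvCands : List String := ["test", "validation", "dev", "val", "train"]

def pick_best_split_py (splits : List String) (preferred : String) : String :=
  if splits = [] then preferred
  else if preferred ∈ splits then preferred
  else
    -- 'for cand in (...): if cand in splits: return cand' = first candidate present
    match pvCands.find? (fun c => splits.contains c) with
    | some c => c
    | none =>
      let fuzzy_test := splits.filter pvTest
      if fuzzy_test ≠ [] then fuzzy_test.headI
      else
        let fuzzy_val := splits.filter pvVal
        if fuzzy_val ≠ [] then fuzzy_val.headI
        else splits.headI

-- ===== PORT B =====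
-- rank(s) of Source B: exact.index(s) if s in exact, else 10 / 11 / 100 by the fuzzy tests
def pvRank (s : String) : Nat :=
  if s ∈ pvCands then (PySem.List.index? pvCands s).getD 0
  else if pvTest s then 10
  else if pvVal s then 11
  else 100

def pick_best_split_py_alt (splits : List String) (preferred : String) : String :=
  match splits with
  | [] => preferred
  | x :: xs =>
    if preferred ∈ x :: xs then preferred
    else
      -- min(splits, key=rank): fold keeping the current best, replaced only on strictly smaller key
      xs.foldl (fun b s => if pvRank s < pvRank b then s else b) x

-- ===== PRECONDITION & SPEC =====
def Spec_pick_best_split_py (splits : List String) (preferred : String) (out : String) : Prop := out = pick_best_split_py_alt splits preferred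
instance (splits : List String) (preferred : String) (out : String) : Decidable (Spec_pick_best_split_py splits preferred out) := by unfold Spec_pick_best_split_py; infer_instance

-- ===== CLAIM (what is proved, stated in full; the proofs are below) =====
def Claim_equal_pick_best_split_py : Prop := ∀ (splits : List String) (preferred : String), Dom_pick_best_split_py splits preferred → Spec_pick_best_split_py splits preferred (pick_best_split_py splits preferred)

-- ===== LEMMAS AND PROOFS =====

-- the fold of B is the FIRST element of x :: xs achieving the minimal rank:
-- there is a decomposition with strictly larger ranks before it and no smaller rank after it
theorem pv_fold_decomp (xs : List String) (x : String) :
    ∃ l1 l2, x :: xs = l1 ++ (xs.foldl (fun b s => if pvRank s < pvRank b then s else b) x) :: l2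
      ∧ (∀ s ∈ l1, pvRank (xs.foldl (fun b s => if pvRank s < pvRank b then s else b) x) < pvRank s)
      ∧ (∀ s ∈ l2, pvRank (xs.foldl (fun b s => if pvRank s < pvRank b then s else b) x) ≤ pvRank s) := by
  induction xs generalizing x with
  | nil => exact ⟨[], [], rfl, by simp, by simp⟩
  | cons s t ih =>
    simp only [List.foldl_cons]
    by_cases h : pvRank s < pvRank x
    · simp only [if_pos h]
      obtain ⟨l1, l2, heq, h1, h2⟩ := ih s
      set m := t.foldl (fun b s => if pvRank s < pvRank b then s else b) s with hm
      have hms : pvRank m ≤ pvRank s := by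
        rcases l1 with _ | ⟨a, l1'⟩
        · simp only [List.nil_append, List.cons.injEq] at heq
          exact heq.1 ▸ le_refl _
        · have ha : a = s := by have := congrArg (fun l => l.headI) heq; simp at this; exact this.symm
          exact Nat.le_of_lt (ha ▸ h1 a (by simp))
      refine ⟨x :: l1, l2, by simpa using heq, ?_, h2⟩
      intro u hu
      rcases List.mem_cons.mp hu with rfl | hu
      · exact lt_of_le_of_lt hms h
      · exact h1 u hu
    · simp only [if_neg h]
      obtain ⟨l1, l2, heq, h1, h2⟩ := ih x
      set m := t.foldl (fun b s => if pvRank s < pvRank b then s else b) x with hm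
      rcases l1 with _ | ⟨a, l1'⟩
      · simp only [List.nil_append, List.cons.injEq] at heq
        obtain ⟨hx, ht⟩ := heq
        refine ⟨[], s :: t, by simp [← hx], by simp, ?_⟩
        intro u hu
        rcases List.mem_cons.mp hu with rfl | hu
        · exact hx ▸ Nat.le_of_not_lt h
        · exact hx ▸ h2 u (ht ▸ hu)
      · have ha : a = x := by have := congrArg (fun l => l.headI) heq; simp at this; exact this.symm
        subst ha
        have ht : t = l1' ++ m :: l2 := by simpa using heq
        refine ⟨a :: s :: l1', l2, by simp [ht], ?_, h2⟩
        intro u hu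
        rcases List.mem_cons.mp hu with rfl | hu
        · exact h1 u (by simp)
        · rcases List.mem_cons.mp hu with rfl | hu
          · exact lt_of_lt_of_le (h1 a (by simp)) (Nat.le_of_not_lt h)
          · exact h1 u (by simp [hu])

-- rank facts: ranks below 5 pin the string to the candidate at that index
theorem pvRank_small (s : String) (h : pvRank s < 5) : pvCands[pvRank s]? = some s := by
  by_cases hm : s ∈ pvCands
  · simp only [pvCands, List.mem_cons, List.not_mem_nil, or_false] at hm
    rcases hm with rfl | rfl | rfl | rfl | rfl <;> decide
  · exfalso
    simp only [pvRank, if_neg hm] at h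
    split_ifs at h <;> omega

theorem pvRank_not_cand (s : String) (hm : s ∉ pvCands) :
    pvRank s = if pvTest s then 10 else if pvVal s then 11 else 100 := by
  simp [pvRank, hm]

-- a string that is not a candidate has rank 10, 11 or 100 — in particular at least 10
theorem pvRank_ge_ten (s : String) (hm : s ∉ pvCands) : 10 ≤ pvRank s := by
  rw [pvRank_not_cand s hm]; split_ifs <;> omega

-- exact case: the minimal-rank element equals the first candidate contained in splits
theorem pv_min_eq_first_cand (splits : List String) (m c : String)
    (hmem : m ∈ splits) (hmin : ∀ s ∈ splits, pvRank m ≤ pvRank s)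
    (hfind : pvCands.find? (fun c => splits.contains c) = some c) : m = c := by
  obtain ⟨hc, cs1, cs2, hcands, hprev⟩ := List.find?_eq_some_iff_append.mp hfind
  have hc_mem : c ∈ splits := by simpa using hc
  have hnd : pvCands.Nodup := by decide
  have hc_not_cs1 : c ∉ cs1 := by
    rw [hcands] at hnd
    intro hmem1
    exact (List.nodup_append.mp hnd).2.2 c hmem1 c (by simp) rfl
  have hrank_c : pvRank c = cs1.length := by
    have hc_cand : c ∈ pvCands := by rw [hcands]; simp
    have : PySem.List.index? pvCands c = some cs1.length :=
      (PySem.List.index?_eq_some_iff pvCands c cs1.length).mpr ⟨cs1, cs2, hcands, rfl, hc_not_cs1⟩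
    simp only [pvRank, if_pos hc_cand, this, Option.getD_some]
  have hlen : cs1.length ≤ 4 := by
    have := congrArg List.length hcands
    simp [pvCands] at this
    omega
  have hfm_le : pvRank m ≤ cs1.length := hrank_c ▸ hmin c hc_mem
  have hsmall : pvCands[pvRank m]? = some m := pvRank_small m (by omega)
  rcases Nat.lt_or_ge (pvRank m) cs1.length with hlt | hge
  · exfalso
    have : cs1[pvRank m]? = some m := by
      rw [hcands] at hsmall
      rwa [List.getElem?_append_left hlt] at hsmall
    have hm1 : m ∈ cs1 := List.mem_of_getElem? this
    have := hprev m hm1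
    simp at this
    exact this hmem
  · have heq : pvRank m = cs1.length := Nat.le_antisymm hfm_le hge
    rw [hcands, heq, List.getElem?_append_right (Nat.le_refl _)] at hsmall
    simp at hsmall
    exact hsmall.symm

-- ===== VERDICT (by name: the statement is the Claim_ definition above) =====
theorem pick_best_split_py_spec : Claim_equal_pick_best_split_py := by
  intro splits preferred _
  unfold Spec_pick_best_split_py
  cases splits with
  | nil => rfl
  | cons x xs =>
    by_cases hp : preferred ∈ x :: xs
    · simp [pick_best_split_py, pick_best_split_py_alt, hp]
    · have hne : (x :: xs) ≠ ([] : List String) := by simp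
      simp only [pick_best_split_py, pick_best_split_py_alt, if_neg hne, if_neg hp]
      obtain ⟨l1, l2, hsp, h1, h2⟩ := pv_fold_decomp xs x
      set m := xs.foldl (fun b s => if pvRank s < pvRank b then s else b) x with hm
      have hmem : m ∈ x :: xs := by rw [hsp]; exact List.mem_append_right _ (by simp)
      have hl1sub : ∀ s ∈ l1, s ∈ x :: xs := by
        intro s hs; rw [hsp]; exact List.mem_append_left _ hs
      have hmin : ∀ s ∈ x :: xs, pvRank m ≤ pvRank s := by
        intro s hs
        rw [hsp] at hs
        rcases List.mem_append.mp hs with h | h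
        · exact Nat.le_of_lt (h1 s h)
        · rcases List.mem_cons.mp h with rfl | h
          · exact Nat.le_refl _
          · exact h2 s h
      cases hfind : pvCands.find? (fun c => (x :: xs).contains c) with
      | some c => exact (pv_min_eq_first_cand (x :: xs) m c hmem hmin hfind).symm
      | none =>
        have hnc : ∀ s ∈ x :: xs, s ∉ pvCands := by
          intro s hs hcand
          have hthis := List.find?_eq_none.mp hfind s hcand
          simp at hthis
          rcases List.mem_cons.mp hs with rfl | h
          · exact hthis.1 rfl
          · exact hthis.2 h
        by_cases hT : (x :: xs).filter pvTest = []
        · have hTall : ∀ s ∈ x :: xs, pvTest s = false := by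
            intro s hs
            have := List.filter_eq_nil_iff.mp hT s hs
            simpa using this
          by_cases hV : (x :: xs).filter pvVal = []
          · -- everything has rank 100
            have hall : ∀ s ∈ x :: xs, pvRank s = 100 := by
              intro s hs
              have hv := List.filter_eq_nil_iff.mp hV s hs
              rw [pvRank_not_cand s (hnc s hs), hTall s hs]
              simp at hv
              simp [hv]
            have hl1nil : l1 = [] := by
              cases l1 with
              | nil => rfl
              | cons a t =>
                exfalso
                have hlt := h1 a (by simp)
                rw [hall a (hl1sub a (by simp)), hall m hmem] at hlt
                omega
            subst hl1nil
            simp only [List.nil_append] at hsp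
            have hx : x = m := by
              have := congrArg List.headI hsp
              simpa using this
            simp [hT, hV, ← hx]
          · -- fuzzy_val branch
            have hVex : ∃ s, s ∈ x :: xs ∧ pvVal s = true := by
              by_contra hco
              push Not at hco
              exact hV (List.filter_eq_nil_iff.mpr (fun a ha => by
                simpa using hco a ha))
            obtain ⟨s0, hs0m, hs0⟩ := hVex
            have hrs0 : pvRank s0 = 11 := by
              rw [pvRank_not_cand s0 (hnc s0 hs0m), hTall s0 hs0m]; simp [hs0]
            have hfm_shape := pvRank_not_cand m (hnc m hmem)
            rw [hTall m hmem] at hfm_shape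
            have hfm11 : pvRank m = 11 := by
              have hle : pvRank m ≤ 11 := hrs0 ▸ hmin s0 hs0m
              simp only [Bool.false_eq_true, if_false] at hfm_shape
              split_ifs at hfm_shape <;> omega
            have hVm : pvVal m = true := by
              by_contra hb
              simp only [Bool.not_eq_true] at hb
              rw [hfm11, hb] at hfm_shape
              simp at hfm_shape
            have hfl1 : l1.filter pvVal = [] := by
              refine List.filter_eq_nil_iff.mpr (fun a ha => ?_)
              intro hpa
              have hlt := h1 a ha
              have hsh := pvRank_not_cand a (hnc a (hl1sub a ha))
              rw [hTall a (hl1sub a ha)] at hsh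
              simp [hpa] at hsh
              rw [hfm11, hsh] at hlt
              omega
            have hfilter : (x :: xs).filter pvVal = m :: l2.filter pvVal := by
              rw [hsp, List.filter_append, hfl1, List.nil_append,
                List.filter_cons_of_pos hVm]
            simp [hT, hfilter]
        · -- fuzzy_test branch
          have hTex : ∃ s, s ∈ x :: xs ∧ pvTest s = true := by
            by_contra hco
            push Not at hco
            exact hT (List.filter_eq_nil_iff.mpr (fun a ha => by
              simpa using hco a ha))
          obtain ⟨s0, hs0m, hs0⟩ := hTex
          have hrs0 : pvRank s0 = 10 := by
            rw [pvRank_not_cand s0 (hnc s0 hs0m)]; simp [hs0]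
          have hfm10 : pvRank m = 10 :=
            Nat.le_antisymm (hrs0 ▸ hmin s0 hs0m) (pvRank_ge_ten m (hnc m hmem))
          have hTm : pvTest m = true := by
            by_contra hb
            simp only [Bool.not_eq_true] at hb
            have hsh := pvRank_not_cand m (hnc m hmem)
            rw [hfm10, hb] at hsh
            simp at hsh
            split_ifs at hsh <;> omega
          have hfl1 : l1.filter pvTest = [] := by
            refine List.filter_eq_nil_iff.mpr (fun a ha => ?_)
            intro hpa
            have hlt := h1 a ha
            have hsh := pvRank_not_cand a (hnc a (hl1sub a ha))
            simp [hpa] at hsh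
            rw [hfm10, hsh] at hlt
            omega
          have hfilter : (x :: xs).filter pvTest = m :: l2.filter pvTest := by
            rw [hsp, List.filter_append, hfl1, List.nil_append,
              List.filter_cons_of_pos hTm]
          simp [hfilter]
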